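-- pv_equiv track=rewrite | github.com/flatironinstitute/RocketSHP | scripts/04_downstream/weng_KRAS/04_visualize_kras_networks.py | res_list_to_pymol
-- ===== SOURCE A (Python) =====
-- def res_list_to_pymol(res_list):
--     # contiguous residues should be dashed and groups comma separated i.e 1-10,15-25,30-42
--     res_list = sorted(res_list)
--     result = [res_list[0]]
--     range_start = res_list[0]
--     last = res_list[0]
--     for i in res_list[1:]:
--         if int(i) - last == 1:
--             result[-1] = f"{range_start}-{i}"
--             last = i
--         else:
--             range_start = i
--             last = i
--             result.append(i)
--     rstring = " or ".join(f"(resi {r})" for r in result)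
--     return rstring
-- ===== SOURCE B (Python) =====
-- def res_list_to_pymol(res_list):
--     # Boundary-detection rewrite: run starts/ends found by adjacent differences, then zipped.
--     xs = sorted(res_list)
--     if not xs:
--         return ""
--     starts = [xs[0]] + [b for a, b in zip(xs, xs[1:]) if b - a != 1]
--     ends = [a for a, b in zip(xs, xs[1:]) if b - a != 1] + [xs[-1]]
--     return " or ".join(
--         f"(resi {s})" if s == e else f"(resi {s}-{e})" for s, e in zip(starts, ends)
--     )
-- ===== Notes on version B (the rewrite author's own statement) =====
-- stated objective: alternative
-- what changed: Replaces A's stateful fold that keeps rewriting the last token in place (tracking range_start and last) by a boundary-detection formulation: run starts and run ends are each read off from adjacent differences of the sorted list, zipped, and mapped to tokens.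
import Mathlib
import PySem

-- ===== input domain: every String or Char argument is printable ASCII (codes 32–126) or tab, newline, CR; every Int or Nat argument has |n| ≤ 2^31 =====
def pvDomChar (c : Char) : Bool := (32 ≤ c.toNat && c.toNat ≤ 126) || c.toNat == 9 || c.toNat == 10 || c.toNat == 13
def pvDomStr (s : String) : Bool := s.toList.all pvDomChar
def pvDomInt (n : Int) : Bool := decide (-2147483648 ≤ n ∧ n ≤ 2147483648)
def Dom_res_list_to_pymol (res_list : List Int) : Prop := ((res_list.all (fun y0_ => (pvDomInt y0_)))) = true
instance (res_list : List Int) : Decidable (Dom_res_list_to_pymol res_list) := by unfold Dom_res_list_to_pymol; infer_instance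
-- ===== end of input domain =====

-- B reformulates A's stateful in-place-rewriting fold as boundary detection on adjacent
-- differences (run starts and run ends zipped); same cost, different structure.

-- ===== PORT A =====
-- A's loop state: result (whose last element is repeatedly overwritten), range_start, last.
-- Python's result holds ints or strings, both rendered by f"{…}" at the join, so we keep
-- strings via PySem.Int.toStr (exact: str(int)).
def pvALoop (rest : List Int) (result : List String) (range_start last : Int) : List String :=
  match rest with
  | [] => result
  | i :: is =>
    if i - last == 1 then
      -- result[-1] = f"{range_start}-{i}"
      pvALoop is (result.dropLast ++ [PySem.Int.toStr range_start ++ "-" ++ PySem.Int.toStr i]) range_start i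
    else
      pvALoop is (result ++ [PySem.Int.toStr i]) i i

def res_list_to_pymol (res_list : List Int) : String :=
  let xs := PySem.List.sorted res_list (fun x => x) false
  match xs with
  | [] => ""   -- Python raises IndexError indexing the first element here; excluded by Pre_
  | x :: rest =>
    let result := pvALoop rest [PySem.Int.toStr x] x x
    PySem.Str.join " or " (result.map (fun r => "(resi " ++ r ++ ")"))

-- ===== PORT B =====
-- [b for a,b in zip(xs, xs[1:]) if b - a != 1]
def pvBStarts (xs : List Int) : List Int :=
  (xs.zip xs.tail).filterMap (fun p => if p.2 - p.1 ≠ 1 then some p.2 else none)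

-- [a for a,b in zip(xs, xs[1:]) if b - a != 1]
def pvBEnds (xs : List Int) : List Int :=
  (xs.zip xs.tail).filterMap (fun p => if p.2 - p.1 ≠ 1 then some p.1 else none)

-- f"(resi {s})" if s == e else f"(resi {s}-{e})"
def pvBTok (p : Int × Int) : String :=
  if p.1 == p.2 then "(resi " ++ PySem.Int.toStr p.1 ++ ")"
  else "(resi " ++ PySem.Int.toStr p.1 ++ "-" ++ PySem.Int.toStr p.2 ++ ")"

def res_list_to_pymol_alt (res_list : List Int) : String :=
  let xs := PySem.List.sorted res_list (fun x => x) false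
  match xs with
  | [] => ""   -- if not xs: return ""
  | x :: rest =>
    let starts := x :: pvBStarts (x :: rest)                          -- [xs[0]] + […]
    let ends := pvBEnds (x :: rest) ++ [(x :: rest).getLast (by simp)]  -- […] + [xs[-1]]
    PySem.Str.join " or " ((starts.zip ends).map pvBTok)

-- ===== PRECONDITION & SPEC =====
-- Pre_ excludes only the empty list, on which Python A raises IndexError indexing the first element.
def Pre_res_list_to_pymol (res_list : List Int) : Prop := res_list ≠ []
instance (res_list : List Int) : Decidable (Pre_res_list_to_pymol res_list) := by unfold Pre_res_list_to_pymol; infer_instance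
def pvWitness_res_list_to_pymol : List Int := [1, 2, 5]

def Spec_res_list_to_pymol (res_list : List Int) (out : String) : Prop := out = res_list_to_pymol_alt res_list
instance (res_list : List Int) (out : String) : Decidable (Spec_res_list_to_pymol res_list out) := by unfold Spec_res_list_to_pymol; infer_instance

-- ===== CLAIM (what is proved, stated in full; the proofs are below) =====
def Claim_equal_res_list_to_pymol : Prop := ∀ (res_list : List Int), Dom_res_list_to_pymol res_list → Pre_res_list_to_pymol res_list → Spec_res_list_to_pymol res_list (res_list_to_pymol res_list)

-- ===== LEMMAS AND PROOFS =====

-- the token A's result list carries for the currently open run [rs..last] (under rs ≤ last)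
def pvTok (rs last : Int) : String :=
  if rs = last then PySem.Int.toStr rs
  else PySem.Int.toStr rs ++ "-" ++ PySem.Int.toStr last

-- A's final token list, as a direct recursion (the open run is [rs..last])
def pvTokensFrom (rs last : Int) (rest : List Int) : List String :=
  match rest with
  | [] => [pvTok rs last]
  | i :: is =>
    if i - last = 1 then pvTokensFrom rs i is
    else pvTok rs last :: pvTokensFrom i i is

theorem pvALoop_eq_tokensFrom (rest : List Int) (acc : List String) (rs last : Int)
    (h : rs ≤ last) :
    pvALoop rest (acc ++ [pvTok rs last]) rs last = acc ++ pvTokensFrom rs last rest := by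
  induction rest generalizing acc rs last with
  | nil => simp [pvALoop, pvTokensFrom]
  | cons i is ih =>
    by_cases hd : i - last = 1
    · have hlt : rs < i := by omega
      have htok : PySem.Int.toStr rs ++ "-" ++ PySem.Int.toStr i = pvTok rs i := by
        unfold pvTok; rw [if_neg (by omega : ¬ rs = i)]
      simp only [pvALoop, pvTokensFrom, if_pos hd, beq_iff_eq]
      rw [List.dropLast_concat, htok, ih acc rs i (by omega)]
    · simp only [pvALoop, pvTokensFrom, if_neg hd, beq_iff_eq]
      have : acc ++ [pvTok rs last] ++ [PySem.Int.toStr i]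
           = (acc ++ [pvTok rs last]) ++ [pvTok i i] := by simp [pvTok]
      rw [this, ih (acc ++ [pvTok rs last]) i i le_rfl]
      simp

theorem pvTokensFrom_eq_zip (rest : List Int) (rs last : Int) :
    pvTokensFrom rs last rest
      = ((rs :: pvBStarts (last :: rest)).zip
          (pvBEnds (last :: rest) ++ [(last :: rest).getLast (by simp)])).map
          (fun p => pvTok p.1 p.2) := by
  induction rest generalizing rs last with
  | nil => simp [pvTokensFrom, pvBStarts, pvBEnds]
  | cons i is ih =>
    have hst : pvBStarts (last :: i :: is)
        = (if i - last ≠ 1 then [i] else []) ++ pvBStarts (i :: is) := by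
      by_cases h2 : i - last = 1 <;> simp [pvBStarts, h2]
    have hen : pvBEnds (last :: i :: is)
        = (if i - last ≠ 1 then [last] else []) ++ pvBEnds (i :: is) := by
      by_cases h2 : i - last = 1 <;> simp [pvBEnds, h2]
    have hgl : (last :: i :: is).getLast (by simp) = (i :: is).getLast (by simp) :=
      List.getLast_cons (by simp)
    by_cases hd : i - last = 1
    · simp only [pvTokensFrom, if_pos hd, hst, hen, hgl, if_neg (by omega : ¬ i - last ≠ 1),
        List.nil_append]
      exact ih rs i
    · simp only [pvTokensFrom, if_neg hd, hst, hen, hgl, if_pos hd, List.cons_append,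
        List.zip_cons_cons, List.map_cons]
      exact congrArg _ (ih i i)

-- ===== VERDICT (by name: the statement is the Claim_ definition above) =====
theorem pvBTok_eq (p : Int × Int) :
    pvBTok p = "(resi " ++ pvTok p.1 p.2 ++ ")" := by
  by_cases h : p.1 = p.2 <;> simp [pvBTok, pvTok, h, String.append_assoc]

theorem res_list_to_pymol_spec : Claim_equal_res_list_to_pymol := by
  intro res_list _ _
  unfold Spec_res_list_to_pymol res_list_to_pymol res_list_to_pymol_alt
  cases hxs : PySem.List.sorted res_list (fun x => x) false with
  | nil => rfl
  | cons x rest =>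
    simp only
    have h0 : [PySem.Int.toStr x] = ([] : List String) ++ [pvTok x x] := by simp [pvTok]
    rw [h0, pvALoop_eq_tokensFrom rest [] x x le_rfl, List.nil_append,
        pvTokensFrom_eq_zip, List.map_map]
    congr 1
    exact (List.map_congr_left (fun p _ => (pvBTok_eq p).symm))
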